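-- pv_equiv track=rewrite | github.com/TheRealPSV/OpenHeroSelect | python_source/xml to json converter (BaconWizard17).py | space_remover
-- ===== SOURCE A (Python) =====
-- special_chars = ';={}'
--
-- def space_remover(old_line):
--     old_line = old_line.strip() # remove leading and trailing spaces (removes indent)
--     new_line = ''
--     i = 0
--     while i < len(old_line):
--         if old_line[i] == ' ':
--             if (old_line[i-1] in special_chars) or (old_line[i+1] in special_chars):
--                 # if the character before or after the space is a special character,
--                 # then the space can be removed.
--                 # otherwise it is a string space, not whitespace
--                 new_line = new_line # had to add this or else code would freak out
--             else:
--                 # this is the string space case. Don't want to remove string spaces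
--                 new_line += old_line[i]
--         else:
--             # not a space, add as normal
--             new_line += old_line[i]
--         i += 1
--     return new_line
-- ===== SOURCE B (Python) =====
-- special_chars = ';={}'
--
-- def space_remover(old_line):
--     # Staged rewriting: for each special char, one replace pass deletes each
--     # single space directly before it, then one pass deletes each single space
--     # directly after it. Non-overlapping single-space patterns reproduce the
--     # original rule exactly (inner spaces of a run survive).
--     s = old_line.strip()
--     for c in special_chars:
--         s = s.replace(' ' + c, c).replace(c + ' ', c)
--     return s
-- ===== Notes on version B (the rewrite author's own statement) =====
-- stated objective: faster
-- what changed: Replaces the character-by-character while loop with per-character neighbour tests and repeated string concatenation by four staged rewrite rounds: for each special char one str.replace pass deletes the single space before it and one pass deletes the single space after it.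
import Mathlib
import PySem

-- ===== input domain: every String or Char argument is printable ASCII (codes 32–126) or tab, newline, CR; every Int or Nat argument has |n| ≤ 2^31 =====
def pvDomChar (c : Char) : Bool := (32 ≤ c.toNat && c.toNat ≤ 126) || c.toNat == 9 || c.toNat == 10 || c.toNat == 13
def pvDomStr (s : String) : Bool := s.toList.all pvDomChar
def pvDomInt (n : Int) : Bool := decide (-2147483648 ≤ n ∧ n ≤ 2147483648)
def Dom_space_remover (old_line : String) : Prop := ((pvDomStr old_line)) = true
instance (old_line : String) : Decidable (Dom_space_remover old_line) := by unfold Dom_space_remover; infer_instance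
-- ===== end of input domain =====

-- B replaces A's per-character scan (with neighbour tests and repeated concatenation) by staged
-- rewriting: for each special char, one replace pass deleting the single space before it and one
-- deleting the single space after it (measured faster: C-level passes vs an interpreted loop).

-- special_chars = ';={}'
def pvSpecials : List Char := [';', '=', '{', '}']

-- ===== PORT A =====
-- Literal port of A's while loop as a foldl over the index range; `pyGetD … ' '` at index i and
-- i-1 is exact (i is in range, and Python's negative wrap at i-1 is pyGetD's too); at i+1 the
-- default '?' is only reachable when s[i] = ' ' and i+1 = len, which cannot occur after strip.
def space_remover (old_line : String) : String :=
  let s := PySem.Chars.strip old_line.toList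
  let new_line := (PySem.List.pyRange 0 (s.length : Int) 1).foldl
    (fun acc i =>
      if PySem.List.pyGetD s i ' ' = ' ' then
        if PySem.List.pyGetD s (i - 1) ' ' ∈ pvSpecials ∨ PySem.List.pyGetD s (i + 1) '?' ∈ pvSpecials then
          acc
        else
          acc ++ [PySem.List.pyGetD s i ' ']
      else
        acc ++ [PySem.List.pyGetD s i ' ']) []
  String.ofList new_line

-- ===== PORT B =====
-- Literal port of Source B: strip, then for each special char c replace ' '+c by c and c+' ' by c.
def space_remover_alt (old_line : String) : String :=
  let s0 := PySem.Chars.strip old_line.toList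
  String.ofList (pvSpecials.foldl
    (fun s c => PySem.Chars.replace (PySem.Chars.replace s [' ', c] [c]) [c, ' '] [c]) s0)

-- ===== PRECONDITION & SPEC =====
def Spec_space_remover (old_line : String) (out : String) : Prop := out = space_remover_alt old_line
instance (old_line : String) (out : String) : Decidable (Spec_space_remover old_line out) := by unfold Spec_space_remover; infer_instance

-- ===== CLAIM (what is proved, stated in full; the proofs are below) =====
def Claim_equal_space_remover : Prop := ∀ (old_line : String), Dom_space_remover old_line → Spec_space_remover old_line (space_remover old_line)

-- ===== LEMMAS AND PROOFS =====

-- Reference form: remove each space whose ORIGINAL next char is in N or ORIGINAL previous char is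
-- in Pv, as a recursion carrying the previous character.
def pvDel (N Pv : List Char) : Char → List Char → List Char
  | _, [] => []
  | p, x :: t =>
      (if x = ' ' ∧ (p ∈ Pv ∨ t.head?.getD '\x00' ∈ N) then [] else [x]) ++ pvDel N Pv x t

-- One non-overlapping pass of `s.replace(' '+c, c)` (resp. `s.replace(c+' ', c)`).
def pvRepN (c : Char) : List Char → List Char
  | [] => []
  | [x] => [x]
  | x :: y :: t => if x = ' ' ∧ y = c then c :: pvRepN c t else x :: pvRepN c (y :: t)

def pvRepP (c : Char) : List Char → List Char
  | [] => []
  | [x] => [x]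
  | x :: y :: t => if x = c ∧ y = ' ' then c :: pvRepP c t else x :: pvRepP c (y :: t)

-- replace.go equations
lemma pvGo_zero (old new : List Char) (l acc : List Char) :
    PySem.Chars.replace.go old new 0 l acc = acc.reverse ++ l := by
  rw [PySem.Chars.replace.go]

lemma pvGo_nil (old new : List Char) (fuel : Nat) (acc : List Char) :
    PySem.Chars.replace.go old new (fuel+1) [] acc = acc.reverse := by
  rw [PySem.Chars.replace.go]
  omega

lemma pvGo_empty (old new : List Char) (fuel : Nat) (acc : List Char) :
    PySem.Chars.replace.go old new fuel [] acc = acc.reverse := by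
  cases fuel with
  | zero => rw [pvGo_zero]; simp
  | succ n => rw [pvGo_nil]

lemma pvGo_cons (old new : List Char) (fuel : Nat) (x : Char) (t acc : List Char) :
    PySem.Chars.replace.go old new (fuel+1) (x :: t) acc =
      if old.isPrefixOf (x :: t) then
        PySem.Chars.replace.go old new fuel (List.drop old.length (x :: t)) (new.reverse ++ acc)
      else PySem.Chars.replace.go old new fuel t (x :: acc) := by
  rw [PySem.Chars.replace.go]

lemma pvGo_repN (c : Char) : ∀ (fuel : Nat) (l acc : List Char), l.length ≤ fuel →
    PySem.Chars.replace.go [' ', c] [c] fuel l acc = acc.reverse ++ pvRepN c l := by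
  intro fuel
  induction fuel with
  | zero =>
      intro l acc h
      have : l = [] := List.length_eq_zero_iff.mp (Nat.le_zero.mp h)
      subst this
      rw [pvGo_zero]
      simp [pvRepN]
  | succ n ih =>
      intro l acc h
      match l with
      | [] => rw [pvGo_nil]; simp [pvRepN]
      | [x] =>
          rw [pvGo_cons]
          have hpre : ([' ', c].isPrefixOf [x]) = false := by
            simp [List.isPrefixOf]
          rw [hpre]
          simp only [if_neg Bool.false_ne_true]
          rw [pvGo_empty]
          simp [pvRepN]
      | x :: y :: t =>
          rw [pvGo_cons]
          by_cases hm : x = ' ' ∧ y = c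
          · have hpre : ([' ', c].isPrefixOf (x :: y :: t)) = true := by
              simp [List.isPrefixOf, hm.1, hm.2]
            rw [hpre, if_pos rfl]
            rw [show List.drop [' ', c].length (x :: y :: t) = t from rfl,
              ih t ([c].reverse ++ acc) (by simp at h ⊢; omega)]
            rw [pvRepN, if_pos hm]
            simp
          · have hpre : ([' ', c].isPrefixOf (x :: y :: t)) = false := by
              simp only [List.isPrefixOf, Bool.and_true, Bool.and_eq_false_iff,
                beq_eq_false_iff_ne, ne_eq]
              rcases not_and_or.mp hm with h' | h'
              · exact Or.inl (fun he => h' he.symm)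
              · exact Or.inr (fun he => h' he.symm)
            rw [hpre]
            simp only [if_neg Bool.false_ne_true]
            rw [ih (y :: t) (x :: acc) (by simp at h ⊢; omega)]
            rw [pvRepN]
            simp [hm]

lemma pvGo_repP (c : Char) : ∀ (fuel : Nat) (l acc : List Char), l.length ≤ fuel →
    PySem.Chars.replace.go [c, ' '] [c] fuel l acc = acc.reverse ++ pvRepP c l := by
  intro fuel
  induction fuel with
  | zero =>
      intro l acc h
      have : l = [] := List.length_eq_zero_iff.mp (Nat.le_zero.mp h)
      subst this
      rw [pvGo_zero]
      simp [pvRepP]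
  | succ n ih =>
      intro l acc h
      match l with
      | [] => rw [pvGo_nil]; simp [pvRepP]
      | [x] =>
          rw [pvGo_cons]
          have hpre : ([c, ' '].isPrefixOf [x]) = false := by
            simp [List.isPrefixOf]
          rw [hpre]
          simp only [if_neg Bool.false_ne_true]
          rw [pvGo_empty]
          simp [pvRepP]
      | x :: y :: t =>
          rw [pvGo_cons]
          by_cases hm : x = c ∧ y = ' '
          · have hpre : ([c, ' '].isPrefixOf (x :: y :: t)) = true := by
              simp [List.isPrefixOf, hm.1, hm.2]
            rw [hpre, if_pos rfl]
            rw [show List.drop [c, ' '].length (x :: y :: t) = t from rfl,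
              ih t ([c].reverse ++ acc) (by simp at h ⊢; omega)]
            rw [pvRepP, if_pos hm]
            simp
          · have hpre : ([c, ' '].isPrefixOf (x :: y :: t)) = false := by
              simp only [List.isPrefixOf, Bool.and_true, Bool.and_eq_false_iff,
                beq_eq_false_iff_ne, ne_eq]
              rcases not_and_or.mp hm with h' | h'
              · exact Or.inl (fun he => h' he.symm)
              · exact Or.inr (fun he => h' he.symm)
            rw [hpre]
            simp only [if_neg Bool.false_ne_true]
            rw [ih (y :: t) (x :: acc) (by simp at h ⊢; omega)]
            rw [pvRepP]
            simp [hm]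

lemma pvReplace_repN (c : Char) (s : List Char) :
    PySem.Chars.replace s [' ', c] [c] = pvRepN c s := by
  rw [PySem.Chars.replace]
  simp only [List.isEmpty_cons, if_neg Bool.false_ne_true]
  rw [pvGo_repN c s.length s [] (le_refl _)]
  rfl

lemma pvReplace_repP (c : Char) (s : List Char) :
    PySem.Chars.replace s [c, ' '] [c] = pvRepP c s := by
  rw [PySem.Chars.replace]
  simp only [List.isEmpty_cons, if_neg Bool.false_ne_true]
  rw [pvGo_repP c s.length s [] (le_refl _)]
  rfl

-- cons-step lemmas for the single passes
lemma pvRepN_cons_ne (c x : Char) (L : List Char) (h : x ≠ ' ') :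
    pvRepN c (x :: L) = x :: pvRepN c L := by
  cases L with
  | nil => simp [pvRepN]
  | cons y L' => rw [pvRepN, if_neg (fun hh => h hh.1)]

lemma pvRepN_cons_space (c : Char) (L : List Char) (h : L.head? ≠ some c) :
    pvRepN c (' ' :: L) = ' ' :: pvRepN c L := by
  cases L with
  | nil => simp [pvRepN]
  | cons y L' =>
      rw [pvRepN, if_neg (fun hh => h (by rw [hh.2]; rfl))]

lemma pvRepP_cons_ne (c x : Char) (L : List Char) (h : x ≠ c) :
    pvRepP c (x :: L) = x :: pvRepP c L := by
  cases L with
  | nil => simp [pvRepP]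
  | cons y L' => rw [pvRepP, if_neg (fun hh => h hh.1)]

lemma pvRepP_cons_head (c x : Char) (L : List Char) (h : L.head? ≠ some ' ') :
    pvRepP c (x :: L) = x :: pvRepP c L := by
  cases L with
  | nil => simp [pvRepP]
  | cons y L' =>
      rw [pvRepP, if_neg (fun hh => h (by rw [hh.2]; rfl))]

-- head of pvDel after a surviving space: it can be `c` only if the original next char is `c`
lemma pvHeadN (N Pv : List Char) (c : Char) (hcN : c ∉ N)
    (hN : ' ' ∉ N) (hN0 : '\x00' ∉ N) (hPv : ' ' ∉ Pv) (t : List Char)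
    (hti : t.head?.getD '\x00' ≠ c) : (pvDel N Pv ' ' t).head? ≠ some c := by
  cases t with
  | nil => rw [pvDel]; simp
  | cons d t' =>
      rw [pvDel]
      by_cases hdel : d = ' ' ∧ (' ' ∈ Pv ∨ t'.head?.getD '\x00' ∈ N)
      · obtain ⟨hd, hor⟩ := hdel
        subst hd
        have hn : t'.head?.getD '\x00' ∈ N := hor.resolve_left hPv
        rw [if_pos ⟨rfl, Or.inr hn⟩]
        cases t' with
        | nil => exact absurd hn hN0
        | cons e t'' =>
            simp only [List.head?_cons, Option.getD_some] at hn
            rw [List.nil_append, pvDel,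
              if_neg (by rintro ⟨h1, -⟩; exact hN (h1 ▸ hn))]
            simp only [List.cons_append, List.head?_cons]
            intro hh
            exact hcN ((Option.some.injEq _ _).mp hh ▸ hn)
      · rw [if_neg hdel]
        simp only [List.cons_append, List.head?_cons]
        intro hh
        simp only [List.head?_cons, Option.getD_some] at hti
        exact hti ((Option.some.injEq _ _).mp hh)

-- identity pass
lemma pvDel_nil_nil : ∀ (s : List Char) (p : Char), pvDel [] [] p s = s := by
  intro s
  induction s with
  | nil => intro p; rw [pvDel]
  | cons x t ih =>
      intro p
      rw [pvDel]
      simp [ih x]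

-- membership congruence
lemma pvDel_congr (N N' Pv Pv' : List Char) (hN : ∀ a : Char, a ∈ N ↔ a ∈ N')
    (hPv : ∀ a : Char, a ∈ Pv ↔ a ∈ Pv') : ∀ (s : List Char) (p : Char),
    pvDel N Pv p s = pvDel N' Pv' p s := by
  intro s
  induction s with
  | nil => intro p; rw [pvDel, pvDel]
  | cons x t ih =>
      intro p
      rw [pvDel, pvDel, ih x]
      congr 1
      by_cases h : x = ' ' ∧ (p ∈ Pv ∨ t.head?.getD '\x00' ∈ N)
      · rw [if_pos h, if_pos ⟨h.1, h.2.elim (fun h' => Or.inl ((hPv p).mp h'))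
          (fun h' => Or.inr ((hN _).mp h'))⟩]
      · rw [if_neg h, if_neg (fun hh => h ⟨hh.1, hh.2.elim (fun h' => Or.inl ((hPv p).mpr h'))
          (fun h' => Or.inr ((hN _).mpr h'))⟩)]

-- PASS 1: the ' '+c replace turns next-neighbour set N into c :: N.
lemma pvL1 (c : Char) (N Pv : List Char) (hcN : c ∉ N) (hc : c ≠ ' ') (hc0 : c ≠ '\x00')
    (hN : ' ' ∉ N) (hN0 : '\x00' ∉ N) (hPv : ' ' ∉ Pv) :
    ∀ (s : List Char) (p : Char), pvRepN c (pvDel N Pv p s) = pvDel (c :: N) Pv p s := by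
  intro s p
  match s with
  | [] => rw [pvDel, pvDel]; simp [pvRepN]
  | x :: t =>
      rw [pvDel, pvDel]
      by_cases hx : x = ' '
      · subst hx
        by_cases hdel : p ∈ Pv ∨ t.head?.getD '\x00' ∈ N
        · rw [if_pos ⟨rfl, hdel⟩,
            if_pos ⟨rfl, hdel.elim Or.inl (fun h' => Or.inr (List.mem_cons_of_mem c h'))⟩]
          simp only [List.nil_append]
          exact pvL1 c N Pv hcN hc hc0 hN hN0 hPv t ' '
        · have hd1 : p ∉ Pv := fun h => hdel (Or.inl h)
          have hd2 : t.head?.getD '\x00' ∉ N := fun h => hdel (Or.inr h)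
          rw [if_neg (fun hh => hdel hh.2)]
          by_cases hhead : t.head?.getD '\x00' = c
          · -- t starts with c: the space is consumed together with that c
            match t, hhead with
            | [], hhead => exact absurd hhead.symm hc0
            | c' :: t', hhead =>
                simp only [List.head?_cons, Option.getD_some] at hhead
                subst hhead
                rw [if_pos ⟨rfl, Or.inr (by simp)⟩]
                rw [pvDel, if_neg (fun hh => hc hh.1), pvDel, if_neg (fun hh => hc hh.1)]
                simp only [List.cons_append, List.nil_append]
                rw [pvRepN, if_pos ⟨rfl, rfl⟩]
                rw [pvL1 c' N Pv hcN hc hc0 hN hN0 hPv t' c']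
          · rw [if_neg (fun hh => hh.2.elim hd1 (fun h' =>
              (List.mem_cons.mp h').elim hhead hd2))]
            simp only [List.cons_append, List.nil_append]
            rw [pvRepN_cons_space c _ (pvHeadN N Pv c hcN hN hN0 hPv t hhead)]
            rw [pvL1 c N Pv hcN hc hc0 hN hN0 hPv t ' ']
      · rw [if_neg (fun hh => hx hh.1), if_neg (fun hh => hx hh.1)]
        simp only [List.cons_append, List.nil_append]
        rw [pvRepN_cons_ne c x _ hx]
        rw [pvL1 c N Pv hcN hc hc0 hN hN0 hPv t x]
  termination_by s => s.length

-- PASS 2: the c+' ' replace turns previous-neighbour set Pv into c :: Pv, provided the string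
-- does not begin with a space whose previous original char is c (maintained by the recursion).
lemma pvL2 (c : Char) (N Pv : List Char) (hc : c ≠ ' ') (hc0 : c ≠ '\x00') (hcPv : c ∉ Pv)
    (hN : ' ' ∉ N) (hN0 : '\x00' ∉ N) (hPv : ' ' ∉ Pv) :
    ∀ (s : List Char) (p : Char), (p = c → s.head?.getD '\x00' ≠ ' ') →
      pvRepP c (pvDel N Pv p s) = pvDel N (c :: Pv) p s := by
  intro s p hside
  match s with
  | [] => rw [pvDel, pvDel]; simp [pvRepP]
  | x :: t =>
      rw [pvDel, pvDel]
      by_cases hx : x = ' '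
      · subst hx
        have hpc : p ≠ c := fun h => hside h (by simp)
        by_cases hdel : p ∈ Pv ∨ t.head?.getD '\x00' ∈ N
        · rw [if_pos ⟨rfl, hdel⟩,
            if_pos ⟨rfl, hdel.elim (fun h' => Or.inl (List.mem_cons_of_mem c h')) Or.inr⟩]
          simp only [List.nil_append]
          exact pvL2 c N Pv hc hc0 hcPv hN hN0 hPv t ' ' (fun h => absurd h.symm hc)
        · have hd1 : p ∉ Pv := fun h => hdel (Or.inl h)
          have hd2 : t.head?.getD '\x00' ∉ N := fun h => hdel (Or.inr h)
          rw [if_neg (fun hh => hdel hh.2),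
            if_neg (fun hh => hh.2.elim (fun h' =>
              (List.mem_cons.mp h').elim hpc hd1) hd2)]
          simp only [List.cons_append, List.nil_append]
          rw [pvRepP_cons_ne c ' ' _ (fun h => hc h.symm)]
          rw [pvL2 c N Pv hc hc0 hcPv hN hN0 hPv t ' ' (fun h => absurd h.symm hc)]
      · rw [if_neg (fun hh => hx hh.1), if_neg (fun hh => hx hh.1)]
        simp only [List.cons_append, List.nil_append]
        by_cases hxc : x = c
        · subst hxc
          match t with
          | [] =>
              rw [pvDel, pvDel]
              simp [pvRepP]
          | y :: t' =>
              by_cases hy : y = ' '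
              · subst hy
                rw [pvDel, pvDel]
                by_cases hn : t'.head?.getD '\x00' ∈ N
                · -- the space after x is deleted on both sides
                  rw [if_pos ⟨rfl, Or.inr hn⟩, if_pos ⟨rfl, Or.inl (by simp)⟩]
                  simp only [List.nil_append]
                  -- head of pvDel N Pv ' ' t' is the N-element, not a space
                  have hhd : (pvDel N Pv ' ' t').head? ≠ some ' ' := by
                    match t', hn with
                    | [], hn => exact absurd hn hN0
                    | e :: t'', hn =>
                        simp only [List.head?_cons, Option.getD_some] at hn
                        rw [pvDel, if_neg (by rintro ⟨h1, -⟩; exact hN (h1 ▸ hn))]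
                        simp only [List.cons_append, List.head?_cons]
                        intro hh
                        exact hN (((Option.some.injEq _ _).mp hh) ▸ hn)
                  rw [pvRepP_cons_head x x _ hhd]
                  rw [pvL2 x N Pv hc hc0 hcPv hN hN0 hPv t' ' ' (fun h => absurd h.symm hc)]
                · rw [if_neg (fun hh => hh.2.elim hcPv hn),
                    if_pos ⟨rfl, Or.inl (by simp)⟩]
                  simp only [List.cons_append, List.nil_append]
                  rw [pvRepP, if_pos ⟨rfl, rfl⟩]
                  rw [pvL2 x N Pv hc hc0 hcPv hN hN0 hPv t' ' ' (fun h => absurd h.symm hc)]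
              · -- next char is not a space: no match at this x
                have hhd : (pvDel N Pv x (y :: t')).head? ≠ some ' ' := by
                  rw [pvDel, if_neg (fun hh => hy hh.1)]
                  simp only [List.cons_append, List.head?_cons]
                  intro hh
                  exact hy ((Option.some.injEq _ _).mp hh)
                rw [pvRepP_cons_head x x _ hhd]
                rw [pvL2 x N Pv hc hc0 hcPv hN hN0 hPv (y :: t') x
                  (fun _ => by simp [hy])]
        · rw [pvRepP_cons_ne c x _ hxc]
          rw [pvL2 c N Pv hc hc0 hcPv hN hN0 hPv t x (fun h => absurd h hxc)]
  termination_by s => s.length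

-- one full round for char c: both passes together
lemma pvRound (c : Char) (N Pv : List Char) (hcN : c ∉ N) (hc : c ≠ ' ') (hc0 : c ≠ '\x00')
    (hcPv : c ∉ Pv) (hN : ' ' ∉ N) (hN0 : '\x00' ∉ N) (hPv : ' ' ∉ Pv) (s : List Char) :
    pvRepP c (pvRepN c (pvDel N Pv '\x00' s)) = pvDel (c :: N) (c :: Pv) '\x00' s := by
  rw [pvL1 c N Pv hcN hc hc0 hN hN0 hPv s '\x00']
  exact pvL2 c (c :: N) Pv hc hc0 hcPv
    (fun h => (List.mem_cons.mp h).elim (fun h' => hc h'.symm) hN)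
    (fun h => (List.mem_cons.mp h).elim (fun h' => hc0 h'.symm) hN0)
    hPv s '\x00' (fun h => absurd h.symm hc0)

-- the whole chain of Source B equals pvDel pvSpecials pvSpecials
lemma pvChain (s : List Char) :
    pvSpecials.foldl (fun s c => PySem.Chars.replace (PySem.Chars.replace s [' ', c] [c]) [c, ' '] [c]) s
      = pvDel pvSpecials pvSpecials '\x00' s := by
  simp only [pvSpecials, List.foldl_cons, List.foldl_nil, pvReplace_repN, pvReplace_repP]
  have hr1 := pvRound ';' [] [] (by decide) (by decide) (by decide) (by decide) (by decide)
    (by decide) (by decide) s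
  rw [pvDel_nil_nil s '\x00'] at hr1
  rw [hr1]
  rw [pvRound '=' [';'] [';'] (by decide) (by decide) (by decide) (by decide) (by decide)
    (by decide) (by decide) s]
  rw [pvRound '{' ['=', ';'] ['=', ';'] (by decide) (by decide) (by decide) (by decide) (by decide)
    (by decide) (by decide) s]
  rw [pvRound '}' ['{', '=', ';'] ['{', '=', ';'] (by decide) (by decide) (by decide) (by decide)
    (by decide) (by decide) (by decide) s]
  exact pvDel_congr ['}', '{', '=', ';'] [';', '=', '{', '}'] ['}', '{', '=', ';'] [';', '=', '{', '}']
    (fun a => by simp only [List.mem_cons, List.not_mem_nil, or_false]; tauto)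
    (fun a => by simp only [List.mem_cons, List.not_mem_nil, or_false]; tauto) s '\x00'

-- ===== A-side: the index loop equals pvDel pvSpecials pvSpecials =====

def pvF (p : Char) (s : List Char) : List Char := pvDel pvSpecials pvSpecials p s

lemma pvF_nil (p : Char) : pvF p [] = [] := by rw [pvF, pvDel]

lemma pvF_cons (p c : Char) (rest : List Char) :
    pvF p (c :: rest) =
      (if c = ' ' ∧ (p ∈ pvSpecials ∨ rest.head?.getD '\x00' ∈ pvSpecials) then [] else [c]) ++ pvF c rest := by
  rw [pvF, pvDel, pvF]

-- A's step and tail-of-loop, by absolute index.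
def pvStepA (s : List Char) (acc : List Char) (i : Int) : List Char :=
  if PySem.List.pyGetD s i ' ' = ' ' then
    if PySem.List.pyGetD s (i - 1) ' ' ∈ pvSpecials ∨ PySem.List.pyGetD s (i + 1) '?' ∈ pvSpecials then
      acc
    else
      acc ++ [PySem.List.pyGetD s i ' ']
  else
    acc ++ [PySem.List.pyGetD s i ' ']

def pvFA (s : List Char) (k : Nat) : List Char :=
  if h : k < s.length then
    (if s[k] = ' ' ∧
        (PySem.List.pyGetD s ((k : Int) - 1) ' ' ∈ pvSpecials ∨
         PySem.List.pyGetD s ((k : Int) + 1) '?' ∈ pvSpecials) then [] else [s[k]]) ++ pvFA s (k + 1)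
  else []
  termination_by s.length - k

lemma pvFA_lt (s : List Char) (k : Nat) (h : k < s.length) :
    pvFA s k = (if s[k] = ' ' ∧
        (PySem.List.pyGetD s ((k : Int) - 1) ' ' ∈ pvSpecials ∨
         PySem.List.pyGetD s ((k : Int) + 1) '?' ∈ pvSpecials) then [] else [s[k]]) ++ pvFA s (k + 1) := by
  rw [pvFA]
  simp [h]

lemma pvFA_ge (s : List Char) (k : Nat) (h : ¬ k < s.length) : pvFA s k = [] := by
  rw [pvFA]
  simp [h]

lemma pvLoopA (s : List Char) : ∀ (k : Nat) (acc : List Char), k ≤ s.length →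
    (PySem.List.pyRange (k : Int) (s.length : Int) 1).foldl (pvStepA s) acc = acc ++ pvFA s k := by
  intro k acc hk
  by_cases h : k < s.length
  · rw [PySem.List.pyRange_one_cons (by exact_mod_cast h)]
    simp only [List.foldl_cons]
    rw [show ((k : Int) + 1) = ((k + 1 : Nat) : Int) by push_cast; ring,
      pvLoopA s (k + 1) (pvStepA s acc (k : Int)) h, pvFA_lt s k h]
    have hget : PySem.List.pyGetD s (k : Int) ' ' = s[k] := by
      rw [PySem.List.pyGetD_natCast]
      exact List.getD_eq_getElem s ' ' h
    unfold pvStepA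
    rw [hget]
    by_cases hc : s[k] = ' '
    · by_cases hn : PySem.List.pyGetD s ((k : Int) - 1) ' ' ∈ pvSpecials ∨
          PySem.List.pyGetD s ((k : Int) + 1) '?' ∈ pvSpecials <;>
        simp [hc, hn]
    · simp [hc]
  · rw [PySem.List.pyRange_one_eq_nil (by exact_mod_cast Nat.le_of_not_lt h), pvFA_ge s k h]
    simp
  termination_by k => s.length - k

-- pvFA from a positive index equals pvF with the real previous character.
lemma pvFA_eq (s : List Char) (hl : ∀ c, s.getLast? = some c → c ≠ ' ') :
    ∀ (k : Nat) (hk0 : 0 < k) (hk : k ≤ s.length),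
      pvFA s k = pvF (s[k - 1]'(by omega)) (s.drop k) := by
  intro k hk0 hk
  by_cases h : k < s.length
  · have hdrop : s.drop k = s[k] :: s.drop (k + 1) := List.drop_eq_getElem_cons h
    rw [pvFA_lt s k h, hdrop]
    rw [pvF_cons]
    have hprev : PySem.List.pyGetD s ((k : Int) - 1) ' ' = s[k - 1]'(by omega) := by
      rw [show ((k : Int) - 1) = ((k - 1 : Nat) : Int) by omega,
        PySem.List.pyGetD_natCast]
      exact List.getD_eq_getElem s ' ' (by omega)
    have hrec := pvFA_eq s hl (k + 1) (by omega) h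
    rw [hrec]
    by_cases hc : s[k] = ' '
    · -- s[k] is a space, so it is not the last character: k + 1 < s.length
      have hk1 : k + 1 < s.length := by
        by_contra hge
        have hlast : s.getLast? = some s[k] := by
          rw [List.getLast?_eq_getElem?]
          have he : s.length - 1 = k := by omega
          rw [he]
          exact List.getElem?_eq_getElem h
        exact hl s[k] hlast hc
      have hnext : PySem.List.pyGetD s ((k : Int) + 1) '?' = s[k + 1] := by
        rw [show ((k : Int) + 1) = ((k + 1 : Nat) : Int) by push_cast; ring,
          PySem.List.pyGetD_natCast]
        exact List.getD_eq_getElem s '?' hk1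
      have hhead : (s.drop (k + 1)).head?.getD '\x00' = s[k + 1] := by
        rw [List.drop_eq_getElem_cons hk1]; rfl
      rw [hprev, hnext, hhead]
      simp only [Nat.add_sub_cancel]
    · rw [hprev, if_neg (fun h' => hc h'.1), if_neg (fun h' => hc h'.1)]
      simp only [Nat.add_sub_cancel]
  · have hlen : k = s.length := by omega
    rw [pvFA_ge s k h]
    simp [hlen, pvF_nil]
  termination_by k _ _ => s.length - k

-- head/last of a stripped list are not whitespace
lemma pv_head_not_space (cs : List Char) (c : Char)
    (h : (PySem.Chars.strip cs).head? = some c) : PySem.Chars.isspace c = false := by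
  unfold PySem.Chars.strip PySem.Chars.rstrip PySem.Chars.lstrip at h
  set l := cs.dropWhile PySem.Chars.isspace with hl
  have hpre : (l.reverse.dropWhile PySem.Chars.isspace).reverse <+: l := by
    have := List.dropWhile_suffix (l := l.reverse) (p := PySem.Chars.isspace)
    have h2 := this.reverse
    rwa [List.reverse_reverse] at h2
  obtain ⟨t, ht⟩ := hpre
  have hne : (l.reverse.dropWhile PySem.Chars.isspace).reverse ≠ [] := by
    intro hnil; rw [hnil] at h; simp at h
  have hhead : l.head? = some c := by
    rw [← ht, List.head?_append_of_ne_nil _ hne]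
    exact h
  have hl_head : ∀ x, l.head? = some x → PySem.Chars.isspace x = false := by
    intro x hx
    have := List.head?_dropWhile_not (p := PySem.Chars.isspace) (l := cs)
    rw [← hl] at this
    cases hh : l.head? with
    | none => simp [hh] at hx
    | some y =>
        rw [hh] at hx this
        cases hx
        simpa using this
  exact hl_head c hhead

lemma pv_last_not_space (cs : List Char) (c : Char)
    (h : (PySem.Chars.strip cs).getLast? = some c) : PySem.Chars.isspace c = false := by
  unfold PySem.Chars.strip PySem.Chars.rstrip PySem.Chars.lstrip at h
  rw [List.getLast?_reverse] at h
  have := List.head?_dropWhile_not (p := PySem.Chars.isspace)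
      (l := (cs.dropWhile PySem.Chars.isspace).reverse)
  rw [h] at this
  simpa using this

-- top level: the index loop from 0 equals pvF '\x00' on a stripped list
lemma pvFA_zero (s : List Char)
    (h0 : ∀ c, s.head? = some c → c ≠ ' ')
    (hl : ∀ c, s.getLast? = some c → c ≠ ' ') :
    pvFA s 0 = pvF '\x00' s := by
  cases s with
  | nil => rw [pvFA_ge _ _ (by simp), pvF_nil]
  | cons c rest =>
      have hc : c ≠ ' ' := h0 c rfl
      rw [pvFA_lt (c :: rest) 0 (by simp)]
      simp only [List.getElem_cons_zero]
      rw [if_neg (fun h' => hc h'.1)]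
      rw [pvF_cons, if_neg (fun h' => hc h'.1)]
      rw [pvFA_eq (c :: rest) hl (0 + 1) (by omega) (by simp)]
      simp

theorem pv_main (old_line : String) :
    space_remover old_line = space_remover_alt old_line := by
  have h0 : ∀ c, (PySem.Chars.strip old_line.toList).head? = some c → c ≠ ' ' := by
    intro c hc hsp
    have := pv_head_not_space old_line.toList c hc
    rw [hsp] at this
    exact absurd this (by decide)
  have hl : ∀ c, (PySem.Chars.strip old_line.toList).getLast? = some c → c ≠ ' ' := by
    intro c hc hsp
    have := pv_last_not_space old_line.toList c hc
    rw [hsp] at this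
    exact absurd this (by decide)
  have hA := pvLoopA (PySem.Chars.strip old_line.toList) 0 [] (Nat.zero_le _)
  simp only [Nat.cast_zero, List.nil_append] at hA
  show String.ofList ((PySem.List.pyRange 0 ((PySem.Chars.strip old_line.toList).length : Int) 1).foldl
      (pvStepA (PySem.Chars.strip old_line.toList)) [])
    = String.ofList (pvSpecials.foldl
        (fun s c => PySem.Chars.replace (PySem.Chars.replace s [' ', c] [c]) [c, ' '] [c])
        (PySem.Chars.strip old_line.toList))
  rw [hA, pvChain, pvFA_zero _ h0 hl, pvF]

-- ===== VERDICT (by name: the statement is the Claim_ definition above) =====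
theorem space_remover_spec : Claim_equal_space_remover := by
  intro old_line _
  unfold Spec_space_remover
  exact pv_main old_line
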